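-- pv_equiv track=rewrite | github.com/Gihoon-Kim-Git/PPDS24F-Daily-Code | week06/26/prob2.py | solution
-- ===== SOURCE A (Python) =====
-- def solution(A):
--     # Implement your solution here
--     dp = [0 for _ in A]
--     dp[0] = A[0]
--
--     for i in range(1, min(len(A), 6)):
--         dp[i] = A[i] + max(dp[:i])
--     for i in range(6, len(A)):
--         dp[i] = A[i] + max(dp[i-6:i])
--
--     return dp[-1]
-- ===== SOURCE B (Python) =====
-- def solution(A):
--     # Monotonic queue: q holds (index, dp-value) pairs with strictly decreasing
--     # values; q[0] is always the maximum dp over the current window of size <= 6,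
--     # so each dp value is obtained in amortized O(1) without scanning the window.
--     q = [(0, A[0])]
--     d = A[0]
--     for i, x in enumerate(A[1:], 1):
--         while q[0][0] < i - 6:
--             q.pop(0)
--         d = x + q[0][1]
--         while q and q[-1][1] <= d:
--             q.pop()
--         q.append((i, d))
--     return d
-- ===== Notes on version B (the rewrite author's own statement) =====
-- stated objective: alternative
-- what changed: Replaces the dp array with its per-step max() scan over a slice by a monotonic queue of (index, dp-value) pairs whose front is always the window maximum, maintained by amortized-O(1) front evictions and tail pops.
import Mathlib
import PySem

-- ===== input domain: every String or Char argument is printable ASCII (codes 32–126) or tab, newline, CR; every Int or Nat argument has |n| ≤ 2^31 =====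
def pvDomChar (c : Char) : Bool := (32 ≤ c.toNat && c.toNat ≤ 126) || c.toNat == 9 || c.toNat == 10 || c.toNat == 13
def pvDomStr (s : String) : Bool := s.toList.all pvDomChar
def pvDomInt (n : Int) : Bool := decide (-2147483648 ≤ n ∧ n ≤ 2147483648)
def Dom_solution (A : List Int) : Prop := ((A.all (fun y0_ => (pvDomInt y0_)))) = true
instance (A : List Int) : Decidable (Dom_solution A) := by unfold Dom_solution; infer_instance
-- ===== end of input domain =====

-- B replaces A's dp array with its per-step max() scan over a slice by a monotonic queue
-- of (index, dp-value) pairs whose front is always the current window maximum (alternative).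

-- ===== PORT A =====
-- dp = [0 for _ in A]; dp[0] = A[0]; two index loops writing dp[i] = A[i] + max(slice); return dp[-1]
def solution (A : List Int) : Int :=
  let n : Int := (A.length : Int)
  let dp : List Int := A.map (fun _ => (0 : Int))
  let dp : List Int := PySem.List.pySetD dp 0 (PySem.List.pyGetD A 0 0)
  let dp : List Int :=
    (PySem.List.pyRange 1 (min n 6) 1).foldl
      (fun dp i =>
        PySem.List.pySetD dp i
          (PySem.List.pyGetD A i 0 +
            ((PySem.List.max? (PySem.List.slice dp (some 0) (some i)) (fun y => y)).getD 0)))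
      dp
  let dp : List Int :=
    (PySem.List.pyRange 6 n 1).foldl
      (fun dp i =>
        PySem.List.pySetD dp i
          (PySem.List.pyGetD A i 0 +
            ((PySem.List.max? (PySem.List.slice dp (some (i - 6)) (some i)) (fun y => y)).getD 0)))
      dp
  PySem.List.pyGetD dp (-1) 0

-- ===== PORT B =====
-- while q[0][0] < i - 6: q.pop(0)
def frontEvict (i : Int) (q : List (Int × Int)) : List (Int × Int) :=
  match q with
  | [] => []
  | p :: rest => if p.1 < i - 6 then frontEvict i rest else p :: rest

-- while q and q[-1][1] <= d: q.pop()
def tailPop (d : Int) (q : List (Int × Int)) : List (Int × Int) :=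
  if h : q = [] then q
  else if (q.getLast h).2 ≤ d then tailPop d q.dropLast else q
termination_by q.length
decreasing_by
  have := List.length_pos_iff.mpr h
  simp [List.length_dropLast]; omega

-- for i, x in enumerate(A[1:], 1): front-evict; d = x + q[0][1]; tail-pop; append (i, d)
def bLoop (q : List (Int × Int)) (d : Int) (i : Int) (xs : List Int) : Int :=
  match xs with
  | [] => d
  | x :: rest =>
      let q1 := frontEvict i q
      let d' := x + (q1.headD (0, 0)).2
      let q2 := tailPop d' q1
      bLoop (q2 ++ [(i, d')]) d' (i + 1) rest

def solution_alt (A : List Int) : Int :=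
  let a := PySem.List.pyGetD A 0 0
  bLoop [((0 : Int), a)] a 1 (PySem.List.slice A (some 1) none)

-- ===== PRECONDITION & SPEC =====
-- A raises IndexError on the empty list (dp[0] = A[0]); B raises there too (q = [(0, A[0])]).
def Pre_solution (A : List Int) : Prop := A ≠ []
instance (A : List Int) : Decidable (Pre_solution A) := by unfold Pre_solution; infer_instance
def pvWitness_solution : List Int := ([1, -2, 3, 4, -5, 6, 7])

def Spec_solution (A : List Int) (out : Int) : Prop := out = solution_alt A
instance (A : List Int) (out : Int) : Decidable (Spec_solution A out) := by unfold Spec_solution; infer_instance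

-- ===== CLAIM (what is proved, stated in full; the proofs are below) =====
def Claim_equal_solution : Prop := ∀ (A : List Int), Dom_solution A → Pre_solution A → Spec_solution A (solution A)

-- ===== LEMMAS AND PROOFS =====

-- Reference: the full dp list, built left to right; each new value adds the max of the last ≤6.
def buildDp (done : List Int) (xs : List Int) : List Int :=
  match xs with
  | [] => done
  | x :: rest =>
      buildDp (done ++ [x + ((PySem.List.max? (done.drop (done.length - 6)) (fun y => y)).getD 0)]) rest

theorem buildDp_length (xs done : List Int) : (buildDp done xs).length = done.length + xs.length := by
  induction xs generalizing done with
  | nil => simp [buildDp]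
  | cons x rest ih => simp [buildDp, ih]; omega

theorem buildDp_append (xs ys done : List Int) :
    buildDp done (xs ++ ys) = buildDp (buildDp done xs) ys := by
  induction xs generalizing done with
  | nil => simp [buildDp]
  | cons x rest ih => simp [buildDp, ih]

-- A's second loop (i from 6) computes buildDp over the remaining elements.
theorem loop2_eq_buildDp (A : List Int) (k : Nat) (done : List Int)
    (hlen : done.length + k = A.length) (h6 : 6 ≤ done.length) :
    (PySem.List.pyRange (done.length : Int) (A.length : Int) 1).foldl
      (fun dp i =>
        PySem.List.pySetD dp i
          (PySem.List.pyGetD A i 0 +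
            ((PySem.List.max? (PySem.List.slice dp (some (i - 6)) (some i)) (fun y => y)).getD 0)))
      (done ++ List.replicate k 0)
      = buildDp done (A.drop done.length) := by
  induction k generalizing done with
  | zero =>
      rw [PySem.List.pyRange_one_eq_nil (by omega)]
      simp [buildDp, List.drop_eq_nil_of_le (by omega : A.length ≤ done.length)]
  | succ k ih =>
      have hlt : done.length < A.length := by omega
      rw [PySem.List.pyRange_one_cons (by omega), List.foldl_cons]
      have hslice : PySem.List.slice (done ++ List.replicate (k+1) (0:Int))
          (some ((done.length : Int) - 6)) (some (done.length : Int))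
          = done.drop (done.length - 6) := by
        have hc : ((done.length : Int) - 6) = ((done.length - 6 : Nat) : Int) := by omega
        rw [hc, PySem.List.slice_natCast,
          List.drop_append_of_le_length (by omega)]
        have h6' : done.length - (done.length - 6) = 6 := by omega
        rw [h6', List.take_left' (by simp; omega)]
      have hget : PySem.List.pyGetD A ((done.length : Int)) 0 = A[done.length] := by
        simp [PySem.List.pyGetD_natCast, List.getD_eq_getElem?_getD, List.getElem?_eq_getElem hlt]
      have hset : ∀ v : Int, PySem.List.pySetD (done ++ List.replicate (k+1) (0:Int))
          ((done.length : Int)) v = (done ++ [v]) ++ List.replicate k 0 := by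
        intro v
        rw [PySem.List.pySetD_natCast, List.set_append, if_neg (by omega)]
        simp [List.replicate_succ]
      rw [hslice, hget, hset]
      have hcast : ((done.length : Int) + 1) = (((done ++ [A[done.length] +
          ((PySem.List.max? (done.drop (done.length - 6)) (fun y => y)).getD 0)]).length : Nat) : Int) := by
        simp
      rw [hcast, ih _ (by simp; omega) (by simp; omega)]
      rw [List.drop_eq_getElem_cons hlt, buildDp]
      simp

-- A's first loop (i from 1 to min(n,6)) computes buildDp over the next j elements.
theorem loop1_eq_buildDp (A : List Int) (j : Nat) (done : List Int)
    (h1 : 1 ≤ done.length) (hj : done.length + j = min A.length 6) (hle : done.length + j ≤ A.length) :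
    (PySem.List.pyRange (done.length : Int) (min (A.length : Int) 6) 1).foldl
      (fun dp i =>
        PySem.List.pySetD dp i
          (PySem.List.pyGetD A i 0 +
            ((PySem.List.max? (PySem.List.slice dp (some 0) (some i)) (fun y => y)).getD 0)))
      (done ++ List.replicate (A.length - done.length) 0)
      = buildDp done ((A.drop done.length).take j) ++ List.replicate (A.length - min A.length 6) 0 := by
  have hmin : (min (A.length : Int) 6) = ((min A.length 6 : Nat) : Int) := by omega
  induction j generalizing done with
  | zero =>
      rw [hmin, PySem.List.pyRange_one_eq_nil (by omega)]
      simp only [List.foldl_nil, List.take_zero, buildDp]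
      have hd : done.length = min A.length 6 := by omega
      rw [hd]
  | succ j ih =>
      have hlt6 : done.length < 6 := by omega
      have hlt : done.length < A.length := by omega
      rw [hmin, PySem.List.pyRange_one_cons (by omega), List.foldl_cons]
      have hslice : PySem.List.slice (done ++ List.replicate (A.length - done.length) (0:Int))
          (some (0:Int)) (some (done.length : Int)) = done := by
        rw [PySem.List.slice_zero_start, PySem.List.slice_to_natCast,
          List.take_left' rfl]
      have hget : PySem.List.pyGetD A ((done.length : Int)) 0 = A[done.length] := by
        simp [PySem.List.pyGetD_natCast, List.getD_eq_getElem?_getD, List.getElem?_eq_getElem hlt]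
      have hset : ∀ v : Int, PySem.List.pySetD (done ++ List.replicate (A.length - done.length) (0:Int))
          ((done.length : Int)) v
          = (done ++ [v]) ++ List.replicate (A.length - (done.length + 1)) 0 := by
        intro v
        rw [PySem.List.pySetD_natCast, List.set_append, if_neg (by omega)]
        have : A.length - done.length = (A.length - (done.length + 1)) + 1 := by omega
        rw [this]
        simp [List.replicate_succ]
      rw [hslice, hget, hset]
      set v := A[done.length] + ((PySem.List.max? done (fun y => y)).getD 0) with hv
      have hcast : ((done.length : Int) + 1) = (((done ++ [v]).length : Nat) : Int) := by simp
      have hrep : A.length - (done.length + 1) = A.length - (done ++ [v]).length := by simp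
      rw [hcast, ← hmin, hrep, ih _ (by simp) (by simp; omega) (by simp; omega)]
      rw [List.drop_eq_getElem_cons hlt, List.take_succ_cons, buildDp]
      have hdrop0 : done.drop (done.length - 6) = done := by
        rw [(by omega : done.length - 6 = 0), List.drop_zero]
      rw [hdrop0, ← hv]
      simp

-- ---- B-side: the canonical monotonic queue over a dp prefix P ----

-- j survives all tail pops so far: every later dp value is strictly smaller
def domB (P : List Int) (j : Nat) : Bool :=
  (List.range P.length).all (fun k => !(decide (j < k)) || decide (P.getD k 0 < P.getD j 0))

def idxs (P : List Int) : List Nat :=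
  (List.range P.length).filter (fun j => decide (P.length ≤ j + 7) && domB P j)

def canonQ (P : List Int) : List (Int × Int) :=
  (idxs P).map (fun (j : Nat) => ((j : Int), P.getD j 0))

def winIdxs (P : List Int) : List Nat :=
  (List.range P.length).filter (fun j => decide (P.length ≤ j + 6) && domB P j)

def winQ (P : List Int) : List (Int × Int) :=
  (winIdxs P).map (fun (j : Nat) => ((j : Int), P.getD j 0))

def wmax (P : List Int) : Int :=
  (PySem.List.max? (P.drop (P.length - 6)) (fun y => y)).getD 0

theorem frontEvict_eq_dropWhile (i : Int) (q : List (Int × Int)) :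
    frontEvict i q = q.dropWhile (fun p => decide (p.1 < i - 6)) := by
  induction q with
  | nil => rfl
  | cons p rest ih =>
      simp only [frontEvict, List.dropWhile_cons]
      by_cases h : p.1 < i - 6
      · simp [h, ih]
      · simp [h]

theorem dropWhile_eq_filter_of_pairwise {α : Type} (p : α → Bool) (l : List α)
    (h : l.Pairwise (fun a b => p b = true → p a = true)) :
    l.dropWhile p = l.filter (fun x => !p x) := by
  induction l with
  | nil => rfl
  | cons a t ih =>
      rw [List.pairwise_cons] at h
      by_cases hp : p a = true
      · simp [hp, ih h.2]
      · simp only [List.dropWhile_cons, List.filter_cons, hp]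
        simp only [Bool.not_eq_true] at hp
        simp
        rw [List.filter_eq_self.mpr]
        intro b hb
        simp only [Bool.not_eq_true']
        by_contra hc
        simp only [Bool.not_eq_false] at hc
        exact absurd (h.1 b hb hc) (by simp [hp])

theorem tailPop_concat (d : Int) (l : List (Int × Int)) (a : Int × Int) :
    tailPop d (l ++ [a]) = if a.2 ≤ d then tailPop d l else l ++ [a] := by
  rw [tailPop]
  simp

theorem tailPop_eq_filter (d : Int) (q : List (Int × Int))
    (h : q.Pairwise (fun a b => b.2 < a.2)) :
    tailPop d q = q.filter (fun p => decide (d < p.2)) := by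
  induction q using List.reverseRecOn with
  | nil => rw [tailPop]; rfl
  | append_singleton l a ih =>
      rw [tailPop_concat, List.filter_append]
      have hp := List.pairwise_append.mp h
      by_cases had : a.2 ≤ d
      · rw [if_pos had, ih hp.1]
        simp [not_lt.mpr had]
      · rw [if_neg had]
        have hall : ∀ b ∈ l, d < b.2 := by
          intro b hb
          have := hp.2.2 b hb a (by simp)
          omega
        rw [List.filter_eq_self.mpr (by intro b hb; simpa using hall b hb)]
        simp [not_le.mp had]

theorem idxs_pairwise (P : List Int) : (idxs P).Pairwise (· < ·) :=
  List.pairwise_lt_range.filter _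

theorem winIdxs_pairwise (P : List Int) : (winIdxs P).Pairwise (· < ·) :=
  List.pairwise_lt_range.filter _

theorem mem_winIdxs (P : List Int) (j : Nat) (h : j ∈ winIdxs P) :
    j < P.length ∧ P.length ≤ j + 6 ∧ domB P j = true := by
  rw [winIdxs, List.mem_filter, List.mem_range] at h
  simp only [Bool.and_eq_true, decide_eq_true_eq] at h
  exact ⟨h.1, h.2.1, h.2.2⟩

theorem domB_lt (P : List Int) (j k : Nat) (hd : domB P j = true) (hjk : j < k)
    (hk : k < P.length) : P.getD k 0 < P.getD j 0 := by
  rw [domB, List.all_eq_true] at hd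
  have := hd k (List.mem_range.mpr hk)
  simpa [hjk] using this

-- front eviction on the canonical queue keeps exactly the indices of the current window
theorem frontEvict_canonQ (P : List Int) :
    frontEvict (P.length : Int) (canonQ P) = winQ P := by
  rw [frontEvict_eq_dropWhile, canonQ, List.dropWhile_map]
  have hpred : ((fun p : Int × Int => decide (p.1 < (P.length : Int) - 6)) ∘
      (fun (j : Nat) => ((j : Int), P.getD j 0))) = (fun j : Nat => decide (j + 6 < P.length)) := by
    funext j
    simp only [Function.comp_apply]
    exact decide_eq_decide.mpr (by omega)
  rw [hpred, dropWhile_eq_filter_of_pairwise _ _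
    ((idxs_pairwise P).imp (fun {a b} hab => by
      simp only [decide_eq_true_eq]; omega))]
  rw [winQ, winIdxs, idxs, List.filter_filter]
  congr 1
  apply List.filter_congr
  intro j _
  by_cases h6 : P.length ≤ j + 6
  · simp [h6, show P.length ≤ j + 7 by omega, show ¬ (j + 6 < P.length) by omega]
  · simp [h6, show j + 6 < P.length by omega]

theorem last_mem_winIdxs (P : List Int) (h : P ≠ []) : P.length - 1 ∈ winIdxs P := by
  have hpos : 0 < P.length := List.length_pos_iff.mpr h
  rw [winIdxs, List.mem_filter, List.mem_range]
  refine ⟨by omega, ?_⟩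
  simp only [Bool.and_eq_true, decide_eq_true_eq]
  refine ⟨by omega, ?_⟩
  rw [domB, List.all_eq_true]
  intro k hk
  rw [List.mem_range] at hk
  simp [show ¬ (P.length - 1 < k) by omega]

-- the head of a strictly sorted list is its minimum
theorem head_le_of_pairwise (l : List Nat) (h : l ≠ []) (hp : l.Pairwise (· < ·)) :
    ∀ x ∈ l, l.head h ≤ x := by
  intro x hx
  cases l with
  | nil => exact absurd rfl h
  | cons a t =>
      simp only [List.head_cons]
      rcases List.mem_cons.mp hx with rfl | hxt
      · exact le_refl x
      · exact le_of_lt ((List.pairwise_cons.mp hp).1 x hxt)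

-- head of winIdxs bounds every dp value of the window
theorem window_le_head (P : List Int) (hne : winIdxs P ≠ []) :
    ∀ t k, P.length - k ≤ t → k < P.length → P.length ≤ k + 6 →
      P.getD k 0 ≤ P.getD ((winIdxs P).head hne) 0 := by
  intro t
  induction t with
  | zero => intro k h1 h2 _; omega
  | succ t ih =>
      intro k h1 h2 h3
      by_cases hk : k ∈ winIdxs P
      · have hle : (winIdxs P).head hne ≤ k :=
          head_le_of_pairwise _ hne (winIdxs_pairwise P) k hk
        rcases eq_or_lt_of_le hle with heq | hlt
        · exact le_of_eq (by rw [heq])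
        · have hdom := (mem_winIdxs P _ (List.head_mem hne)).2.2
          exact le_of_lt (domB_lt P _ k hdom hlt h2)
      · have hnd : domB P k = false := by
          by_contra hc
          apply hk
          rw [winIdxs, List.mem_filter, List.mem_range]
          simp only [Bool.and_eq_true, decide_eq_true_eq, Bool.not_eq_false] at hc ⊢
          exact ⟨h2, h3, hc⟩
        rw [domB, List.all_eq_false] at hnd
        obtain ⟨m, hm, hmp⟩ := hnd
        rw [List.mem_range] at hm
        have hkm : k < m ∧ P.getD k 0 ≤ P.getD m 0 := by
          by_cases hkm' : k < m
          · refine ⟨hkm', ?_⟩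
            simp [hkm'] at hmp
            simp only [List.getD_eq_getElem?_getD]
            omega
          · simp [hkm'] at hmp
        obtain ⟨hkm1, hkm2⟩ := hkm
        exact le_trans hkm2 (ih m (by omega) hm (by omega))

theorem head_winQ_wmax (P : List Int) (hP : P ≠ []) :
    ((winQ P).headD (0, 0)).2 = wmax P := by
  have hpos : 0 < P.length := List.length_pos_iff.mpr hP
  have hne : winIdxs P ≠ [] := by
    intro hc
    have := last_mem_winIdxs P hP
    rw [hc] at this
    exact absurd this (List.not_mem_nil)
  have hmem : (winIdxs P).head hne ∈ winIdxs P := List.head_mem hne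
  obtain ⟨hj0lt, hj0win, _⟩ := mem_winIdxs P _ hmem
  have hwqne : winQ P ≠ [] := by
    rw [winQ]
    simpa using hne
  have hWQ : ((winQ P).headD (0, 0)).2 = P.getD ((winIdxs P).head hne) 0 := by
    rw [List.headD_eq_head?, winQ, List.head?_map, List.head?_eq_some_head hne]
    rfl
  rw [hWQ]
  have hWne : P.drop (P.length - 6) ≠ [] := by
    intro hc
    have := congrArg List.length hc
    simp at this
    omega
  obtain ⟨m, hmeq⟩ : ∃ m, PySem.List.max? (P.drop (P.length - 6)) (fun y => y) = some m := by
    cases h : PySem.List.max? (P.drop (P.length - 6)) (fun y => y) with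
    | none => exact absurd ((PySem.List.max?_eq_none_iff _ _).mp h) hWne
    | some m => exact ⟨m, rfl⟩
  have hmmem : m ∈ P.drop (P.length - 6) := PySem.List.max?_mem hmeq
  have hmmax : ∀ y ∈ P.drop (P.length - 6), y ≤ m := fun y hy => PySem.List.max?_isMax hmeq y hy
  have hwmax : wmax P = m := by rw [wmax, hmeq]; rfl
  rw [hwmax]
  have hbound : ∀ y ∈ P.drop (P.length - 6), y ≤ P.getD ((winIdxs P).head hne) 0 := by
    intro y hy
    obtain ⟨i, hi, hiy⟩ := List.mem_iff_getElem.mp hy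
    have hWlen : (P.drop (P.length - 6)).length = P.length - (P.length - 6) := by simp
    have hidx : P.length - 6 + i < P.length := by
      rw [hWlen] at hi
      omega
    have hYP : y = P.getD (P.length - 6 + i) 0 := by
      rw [← hiy, List.getElem_drop]
      rw [List.getD_eq_getElem?_getD, List.getElem?_eq_getElem hidx]
      rfl
    rw [hYP]
    exact window_le_head P hne (P.length) (P.length - 6 + i) (by omega) hidx
      (by rw [hWlen] at hi; omega)
  have hj0W : P.getD ((winIdxs P).head hne) 0 ∈ P.drop (P.length - 6) := by
    have hlo : P.length - 6 ≤ (winIdxs P).head hne := by omega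
    have hWlen : (P.drop (P.length - 6)).length = P.length - (P.length - 6) := by simp
    have hidx : (winIdxs P).head hne - (P.length - 6) < (P.drop (P.length - 6)).length := by
      rw [hWlen]
      omega
    have hval : (P.drop (P.length - 6))[(winIdxs P).head hne - (P.length - 6)]'hidx
        = P.getD ((winIdxs P).head hne) 0 := by
      rw [List.getElem_drop]
      rw [List.getD_eq_getElem?_getD, List.getElem?_eq_getElem hj0lt]
      simp only [Option.getD_some]
      congr 1
      omega
    rw [← hval]
    exact List.getElem_mem hidx
  exact le_antisymm (hmmax _ hj0W) (hbound m hmmem)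

-- dp values along the monotonic queue are strictly decreasing
theorem winQ_values_decreasing (P : List Int) :
    (winQ P).Pairwise (fun a b => b.2 < a.2) := by
  rw [winQ, List.pairwise_map]
  refine ((winIdxs_pairwise P).imp_of_mem (fun {a b} ha hb hab => ?_))
  obtain ⟨hblt, _, _⟩ := mem_winIdxs P b hb
  obtain ⟨_, _, hdom⟩ := mem_winIdxs P a ha
  exact domB_lt P a b hdom hab hblt

theorem getD_append_left (l l' : List Int) (n : Nat) (h : n < l.length) :
    (l ++ l').getD n 0 = l.getD n 0 := by
  simp [List.getD_eq_getElem?_getD, List.getElem?_append_left h]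

theorem all_congr_mem {α : Type} {l : List α} {p q : α → Bool}
    (h : ∀ a ∈ l, p a = q a) : l.all p = l.all q := by
  induction l with
  | nil => rfl
  | cons a t ih =>
      simp only [List.all_cons]
      rw [h a (by simp), ih (fun b hb => h b (List.mem_cons_of_mem a hb))]

-- one step of the queue update produces the canonical queue of the extended prefix
theorem step_canonQ (P : List Int) (v : Int) :
    tailPop v (winQ P) ++ [((P.length : Int), v)] = canonQ (P ++ [v]) := by
  rw [tailPop_eq_filter v _ (winQ_values_decreasing P), winQ, List.filter_map,
    winIdxs, List.filter_filter]
  rw [canonQ, idxs]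
  have hlen : (P ++ [v]).length = P.length + 1 := by simp
  rw [hlen, List.range_succ, List.filter_append]
  -- the new index P.length is kept
  have hlastkeep : List.filter
      (fun j => decide (P.length + 1 ≤ j + 7) && domB (P ++ [v]) j) [P.length] = [P.length] := by
    rw [List.filter_cons]
    have h7 : decide (P.length + 1 ≤ P.length + 7) = true := decide_eq_true (by omega)
    have hdom : domB (P ++ [v]) P.length = true := by
      rw [domB, List.all_eq_true]
      intro k hk
      rw [hlen, List.mem_range] at hk
      simp [show ¬ (P.length < k) by omega]
    simp [hdom]
  rw [hlastkeep, List.map_append]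
  have hlastmap : List.map (fun (j : Nat) => ((j : Int), (P ++ [v]).getD j 0)) [P.length]
      = [((P.length : Int), v)] := by
    simp [List.getD_eq_getElem?_getD]
  rw [hlastmap]
  congr 1
  -- old indices: same filter,同 values
  have hfil : List.filter (fun j => decide (P.length + 1 ≤ j + 7) && domB (P ++ [v]) j)
        (List.range P.length)
      = List.filter (fun j =>
          ((fun p : Int × Int => decide (v < p.2)) ∘ fun (j : Nat) => ((j : Int), P.getD j 0)) j &&
          (decide (P.length ≤ j + 6) && domB P j))
        (List.range P.length) := by
    apply List.filter_congr
    intro j hj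
    rw [List.mem_range] at hj
    have h7 : decide (P.length + 1 ≤ j + 7) = decide (P.length ≤ j + 6) :=
      decide_eq_decide.mpr (by omega)
    have hdom : domB (P ++ [v]) j = (domB P j && decide (v < P.getD j 0)) := by
      rw [domB, domB, hlen, List.range_succ, List.all_append]
      have hgj : (P ++ [v]).getD j 0 = P.getD j 0 := getD_append_left P [v] j hj
      have hlow : (List.range P.length).all
            (fun k => !(decide (j < k)) || decide ((P ++ [v]).getD k 0 < (P ++ [v]).getD j 0))
          = (List.range P.length).all
            (fun k => !(decide (j < k)) || decide (P.getD k 0 < P.getD j 0)) := by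
        apply all_congr_mem
        intro k hk
        rw [List.mem_range] at hk
        rw [hgj, getD_append_left P [v] k hk]
      have hhigh : ([P.length].all
            (fun k => !(decide (j < k)) || decide ((P ++ [v]).getD k 0 < (P ++ [v]).getD j 0)))
          = decide (v < P.getD j 0) := by
        have hgn : (P ++ [v]).getD P.length 0 = v := by
          simp [List.getD_eq_getElem?_getD]
        simp [hj, List.getD_eq_getElem?_getD, List.getElem?_append_left hj]
      rw [hlow, hhigh]
    rw [h7, hdom]
    simp only [Function.comp_apply]
    rcases Bool.eq_false_or_eq_true (domB P j) with hD | hD <;>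
      rcases Bool.eq_false_or_eq_true (decide (P.length ≤ j + 6)) with hW | hW <;>
      simp [hD, hW, Bool.and_comm]
  rw [← hfil]
  apply List.map_congr_left
  intro j hjmem
  have hj : j < P.length := List.mem_range.mp (List.mem_of_mem_filter hjmem)
  rw [getD_append_left P [v] j hj]

theorem bLoop_eq (xs P : List Int) (h : P ≠ []) :
    bLoop (canonQ P) (P.getLastD 0) ((P.length : Int)) xs = (buildDp P xs).getLastD 0 := by
  induction xs generalizing P with
  | nil => simp [bLoop, buildDp]
  | cons x rest ih =>
      simp only [bLoop, buildDp]
      rw [frontEvict_canonQ, head_winQ_wmax P h]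
      rw [show ((PySem.List.max? (P.drop (P.length - 6)) fun y => y).getD 0) = wmax P from rfl]
      rw [step_canonQ P (x + wmax P)]
      have hrec := ih (P ++ [x + wmax P]) (by simp)
      rw [List.getLastD_concat] at hrec
      rw [show ((P.length : Int) + 1) = (((P ++ [x + wmax P]).length : Nat) : Int) from by simp]
      exact hrec

-- ===== VERDICT (by name: the statement is the Claim_ definition above) =====
theorem solution_spec : Claim_equal_solution := by
  intro A hdom hpre
  unfold Spec_solution
  obtain ⟨a, A', rfl⟩ : ∃ a A', A = a :: A' := by
    cases A with
    | nil => exact absurd rfl hpre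
    | cons a t => exact ⟨a, t, rfl⟩
  have hne : buildDp [a] A' ≠ [] := by
    intro hc
    have := congrArg List.length hc
    rw [buildDp_length] at this
    simp at this
  have hB : solution_alt (a :: A') = (buildDp [a] A').getLastD 0 := by
    simp only [solution_alt, PySem.List.slice_from_one, List.tail_cons,
      PySem.List.pyGetD_zero_cons]
    have hq : canonQ [a] = [((0 : Int), a)] := by
      simp [canonQ, idxs, domB, List.range_succ]
    rw [← hq]
    exact bLoop_eq A' [a] (by simp)
  have hA : solution (a :: A') = PySem.List.pyGetD (buildDp [a] A') (-1) 0 := by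
    simp only [solution]
    have hinit : PySem.List.pySetD ((a :: A').map (fun _ => (0:Int))) 0
        (PySem.List.pyGetD (a :: A') 0 0) = [a] ++ List.replicate A'.length 0 := by
      rw [List.map_const', PySem.List.pySetD_of_nonneg _ _ (by norm_num)]
      simp [List.replicate_succ]
    rw [hinit]
    have h1 := loop1_eq_buildDp (a :: A') (min (a :: A').length 6 - 1) [a]
      (by simp) (by simp) (by simp)
    norm_num at h1 ⊢
    rw [h1]
    by_cases h6 : A'.length + 1 ≤ 6
    · have hmin : min (A'.length + 1) 6 = A'.length + 1 := by omega
      rw [hmin, Nat.add_sub_cancel, List.take_length, Nat.sub_self, List.replicate_zero,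
        List.append_nil, PySem.List.pyRange_one_eq_nil (by omega), List.foldl_nil]
    · have hmin : min (A'.length + 1) 6 = 6 := by omega
      rw [hmin, show (6:Nat) - 1 = 5 from rfl]
      have hD1 : (buildDp [a] (A'.take 5)).length = 6 := by
        rw [buildDp_length]
        simp
        omega
      have h2 := loop2_eq_buildDp (a :: A') (A'.length + 1 - 6) (buildDp [a] (A'.take 5))
        (by rw [hD1]; simp; omega) (by rw [hD1])
      rw [hD1] at h2
      norm_num at h2
      rw [h2, ← buildDp_append, List.take_append_drop]
  rw [hA, hB, PySem.List.pyGetD_neg_one _ _ hne, List.getLastD_eq_getLast?,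
    List.getLast?_eq_some_getLast hne]
  rfl
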